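-- pv_equiv track=rewrite | github.com/vaibhavkumarjonwal/swarlipi | Backend/app/services/generators.py | generate_transition
-- ===== SOURCE A (Python) =====
-- def generate_transition(kern_output, from_vibhaag, to_vibhaag):
--     # count number of divisions passed in last beat cycle, next taali will be at this count index
--     count_division = 0
--
--     for i in reversed(range(len(kern_output))):
--         if kern_output[i].startswith('\n=='):
--             break
--         elif kern_output[i] == '\n=\n':
--             count_division = (count_division + 1 ) % len(from_vibhaag)
--
--     # get index of sam in from vibhaag
--     from_sam_index = -1
--     for i in range(len(from_vibhaag)):
--         if from_vibhaag[i] == 'X':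
--             from_sam_index = i
--             break
--
--     # get index of sam in to vibhaag
--     to_sam_index = -1
--     for i in range(len(to_vibhaag)):
--         if to_vibhaag[i] == 'X':
--             to_sam_index = i
--             break
--
--     i = 0
--     x = ((from_sam_index + i) % len(from_vibhaag))
--
--     while ((from_sam_index + i) % len(from_vibhaag)) != count_division:
--         i += 1
--
--     # find next taali index in to vibhaag
--     next_taali_index = ((to_sam_index + i) % len(from_vibhaag))
--
--     # starting from index as per count_division, number of divisions to repeat
--     count_repeat_division = (len(from_vibhaag) - next_taali_index) % len(from_vibhaag)
--
--     count = -1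
--     i = 0
--     while count < count_division and i < len(kern_output):
--         item = kern_output[i]
--         if item.startswith('\n==') or item == ('\n=\n'):
--             count += 1
--
--         i += 1
--
--     # If starts with rest, then move to next beat cycle at same taali or khali
--     count = 0
--     if kern_output[i].strip() == '4ryy':
--         while count < len(from_vibhaag) and i < len(kern_output):
--             item = kern_output[i]
--             if item.startswith('\n==') or item == ('\n=\n'):
--                 count += 1
--             i += 1
--
--     # transition output starts from index i
--     transition_kern = []
--
--     count = 0
--     while count < count_repeat_division and i < len(kern_output):
--         item = kern_output[i]
--
--         if item.startswith('\n==') or item == ('\n=\n'):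
--             count += 1
--             item = '\n=\n'
--
--         transition_kern.append(item)
--         i += 1
--
--     # Join and clean up newlines
--     kern_str = ''.join(transition_kern)
--     kern_str = kern_str.replace('\n\n', '\n')  # Remove duplicate newlines
--     return kern_str.strip(), transition_kern
-- ===== SOURCE B (Python) =====
-- def _split_blocks(items):
--     """Partition into blocks each ending at a barline, plus a barline-free tail."""
--     blocks, cur = [], []
--     for s in items:
--         cur.append(s)
--         if s.startswith('\n==') or s == '\n=\n':
--             blocks.append(cur)
--             cur = []
--     return blocks, cur
--
--
-- def _sam_index(v):
--     for j, s in enumerate(v):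
--         if s == 'X':
--             return j
--     return -1
--
--
-- def generate_transition(kern_output, from_vibhaag, to_vibhaag):
--     n = len(from_vibhaag)
--     blocks, tail = _split_blocks(kern_output)
--
--     # divisions since the last heavy ('\n==') barline, via a forward reset counter
--     since_heavy = 0
--     for b in blocks:
--         since_heavy = 0 if b[-1].startswith('\n==') else since_heavy + 1
--     count_division = since_heavy % n
--
--     steps = (count_division - _sam_index(from_vibhaag)) % n
--     next_taali_index = (_sam_index(to_vibhaag) + steps) % n
--     count_repeat_division = (n - next_taali_index) % n
--
--     start = count_division + 1
--     bs, tl = (blocks[start:], tail) if start <= len(blocks) else ([], [])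
--     lead = bs[0][0] if bs else tl[0]
--     if lead.strip() == '4ryy':
--         bs, tl = (bs[n:], tl) if n <= len(bs) else ([], [])
--
--     taken = [b[:-1] + ['\n=\n'] for b in bs[:count_repeat_division]]
--     transition_kern = [s for b in taken for s in b]
--     if count_repeat_division > len(bs):
--         transition_kern += tl
--     kern_str = ''.join(transition_kern).replace('\n\n', '\n')
--     return kern_str.strip(), transition_kern
-- ===== Notes on version B (the rewrite author's own statement) =====
-- stated objective: alternative
-- what changed: B parses kern_output once into barline-terminated blocks (plus a barline-free tail) and then does everything by arithmetic on that block list - a forward reset counter over blocks replaces A's reversed break-scan, a closed-form modulus replaces A's incrementing while-search, and block slicing plus one map replaces A's three counter-driven index walks over the flat list.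
import Mathlib
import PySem

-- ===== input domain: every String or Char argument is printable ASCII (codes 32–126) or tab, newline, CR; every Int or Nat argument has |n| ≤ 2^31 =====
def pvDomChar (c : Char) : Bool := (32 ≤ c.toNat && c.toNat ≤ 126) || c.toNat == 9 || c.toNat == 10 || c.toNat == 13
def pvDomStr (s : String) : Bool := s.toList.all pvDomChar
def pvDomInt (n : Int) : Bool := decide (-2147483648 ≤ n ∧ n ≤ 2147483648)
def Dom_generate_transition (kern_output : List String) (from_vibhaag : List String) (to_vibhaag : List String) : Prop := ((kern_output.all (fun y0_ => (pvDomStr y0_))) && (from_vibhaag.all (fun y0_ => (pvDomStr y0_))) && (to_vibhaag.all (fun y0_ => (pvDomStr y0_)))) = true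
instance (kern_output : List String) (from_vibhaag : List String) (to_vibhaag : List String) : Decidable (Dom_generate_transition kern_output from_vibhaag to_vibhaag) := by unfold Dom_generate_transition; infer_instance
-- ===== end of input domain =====

-- B first parses kern_output once into barline-terminated blocks and then selects blocks by
-- slice arithmetic instead of A's counter-driven walks over the flat list (objective: alternative).

-- ===== PORT A =====
-- 'for i in reversed(range(len(kern_output))): … break / count_division = (count_division+1) % len(from_vibhaag)'
def aCdLoop (kern : List String) (n : Int) : List Nat → Int → Int
  | [], cd => cd
  | i :: rest, cd =>
    if PySem.Str.startswith (kern.getD i "") "\n==" then cd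
    else if kern.getD i "" == "\n=\n" then aCdLoop kern n rest (PySem.Int.mod (cd + 1) n)
    else aCdLoop kern n rest cd

-- 'for i in range(len(v)): if v[i] == 'X': sam = i; break'  (sam starts at -1)
def aSamLoop (v : List String) : List Nat → Int
  | [] => -1
  | i :: rest => if v.getD i "" == "X" then (i : Int) else aSamLoop v rest

-- 'while ((from_sam_index + i) % n) != count_division: i += 1'
-- fuel only makes the loop total; on Pre_ (n > 0) Python exits within n iterations and so does this.
def aIncLoop (fsi n cd : Int) : Nat → Int → Int
  | 0, i => i
  | fuel + 1, i =>
    if PySem.Int.mod (fsi + i) n ≠ cd then aIncLoop fsi n cd fuel (i + 1) else i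

-- 'while count < target and i < len(kern_output): item = kern_output[i]; if boundary: count += 1; i += 1'
def aAdvLoop (kern : List String) (target : Int) (i : Nat) (count : Int) : Nat :=
  if h : count < target ∧ i < kern.length then
    aAdvLoop kern target (i + 1)
      (if PySem.Str.startswith (kern.getD i "") "\n==" || kern.getD i "" == "\n=\n" then count + 1
       else count)
  else i
termination_by kern.length - i
decreasing_by omega

-- third while loop: same walk, appending items (boundary items rewritten to '\n=\n')
def aCollectLoop (kern : List String) (target : Int) (i : Nat) (count : Int) (acc : List String) : List String :=
  if h : count < target ∧ i < kern.length then
    if PySem.Str.startswith (kern.getD i "") "\n==" || kern.getD i "" == "\n=\n" then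
      aCollectLoop kern target (i + 1) (count + 1) (acc ++ ["\n=\n"])
    else
      aCollectLoop kern target (i + 1) count (acc ++ [kern.getD i ""])
  else acc
termination_by kern.length - i
decreasing_by all_goals omega

def generate_transition (kern_output : List String) (from_vibhaag : List String) (to_vibhaag : List String) : String × List String :=
  let n : Int := from_vibhaag.length
  let count_division := aCdLoop kern_output n (List.range kern_output.length).reverse 0
  let from_sam_index := aSamLoop from_vibhaag (List.range from_vibhaag.length)
  let to_sam_index := aSamLoop to_vibhaag (List.range to_vibhaag.length)
  let i := aIncLoop from_sam_index n count_division n.toNat 0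
  let next_taali_index := PySem.Int.mod (to_sam_index + i) n
  let count_repeat_division := PySem.Int.mod (n - next_taali_index) n
  let i1 := aAdvLoop kern_output count_division 0 (-1)
  -- 'if kern_output[i].strip() == '4ryy'' — on Pre_ the index is in range (getD is exact there)
  let i2 := if PySem.Str.strip (kern_output.getD i1 "") == "4ryy" then aAdvLoop kern_output n i1 0 else i1
  let transition_kern := aCollectLoop kern_output count_repeat_division i2 0 []
  let kern_str := PySem.Str.replace (PySem.Str.join "" transition_kern) "\n\n" "\n"
  (PySem.Str.strip kern_str, transition_kern)

-- ===== PORT B =====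
def bIsBoundary (s : String) : Bool := PySem.Str.startswith s "\n==" || s == "\n=\n"

-- _split_blocks: one forward pass appending to the open block, closing it at each barline
def bSplitAux (blocks : List (List String)) (cur : List String) : List String → List (List String) × List String
  | [] => (blocks, cur)
  | s :: rest =>
    if bIsBoundary s then bSplitAux (blocks ++ [cur ++ [s]]) [] rest
    else bSplitAux blocks (cur ++ [s]) rest

-- _sam_index: 'for j, s in enumerate(v): if s == 'X': return j' else -1
def bSamAux : List String → Int → Int
  | [], _ => -1
  | s :: rest, j => if s == "X" then j else bSamAux rest (j + 1)

-- b[-1].startswith('\n==') on a block (blocks are nonempty by construction, so getLastD is exact)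
def bHeavy (b : List String) : Bool := PySem.Str.startswith (b.getLastD "") "\n=="

def generate_transition_alt (kern_output : List String) (from_vibhaag : List String) (to_vibhaag : List String) : String × List String :=
  let n : Int := from_vibhaag.length
  let p := bSplitAux [] [] kern_output
  let blocks := p.1
  let tail := p.2
  -- 'since_heavy = 0 if b[-1].startswith('\n==') else since_heavy + 1' over blocks
  let since_heavy := blocks.foldl (fun k b => if bHeavy b then 0 else k + 1) (0 : Int)
  let count_division := PySem.Int.mod since_heavy n
  let steps := PySem.Int.mod (count_division - bSamAux from_vibhaag 0) n
  let next_taali_index := PySem.Int.mod (bSamAux to_vibhaag 0 + steps) n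
  let count_repeat_division := PySem.Int.mod (n - next_taali_index) n
  let start := count_division + 1
  -- '(blocks[start:], tail) if start <= len(blocks) else ([], [])'
  let q := if start ≤ (blocks.length : Int) then (blocks.drop start.toNat, tail) else (([] : List (List String)), ([] : List String))
  -- 'lead = bs[0][0] if bs else tl[0]' — on Pre_ the accesses are in range (headD is exact there)
  let lead := match q.1 with
    | b :: _ => b.headD ""
    | [] => q.2.headD ""
  let r := if PySem.Str.strip lead == "4ryy" then
             (if n ≤ (q.1.length : Int) then (q.1.drop n.toNat, q.2) else (([] : List (List String)), ([] : List String)))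
           else q
  let taken := (r.1.take count_repeat_division.toNat).map (fun b => b.dropLast ++ ["\n=\n"])
  let transition_kern := taken.flatten ++ (if (r.1.length : Int) < count_repeat_division then r.2 else [])
  let kern_str := PySem.Str.replace (PySem.Str.join "" transition_kern) "\n\n" "\n"
  (PySem.Str.strip kern_str, transition_kern)

-- ===== PRECONDITION & SPEC =====
-- Pre_ excludes exactly the inputs where Python A raises: from_vibhaag = [] (ZeroDivisionError on
-- '% len(from_vibhaag)'), and the bare access kern_output[i] before the '4ryy' test going out of
-- range (IndexError), i.e. the (count_division+1)-th boundary missing or last in kern_output.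
def preBoundaryIdxs (kern : List String) : List Nat :=
  (List.range kern.length).filter
    (fun i => PySem.Str.startswith (kern.getD i "") "\n==" || kern.getD i "" == "\n=\n")

def preCountDivision (kern : List String) (n : Nat) : Nat :=
  ((kern.reverse.takeWhile (fun s => !(PySem.Str.startswith s "\n=="))).countP
    (fun s => s == "\n=\n")) % n

def Pre_generate_transition (kern_output : List String) (from_vibhaag : List String) (to_vibhaag : List String) : Prop :=
  from_vibhaag ≠ [] ∧
  preCountDivision kern_output from_vibhaag.length < (preBoundaryIdxs kern_output).length ∧
  (preBoundaryIdxs kern_output).getD (preCountDivision kern_output from_vibhaag.length) 0 + 1 < kern_output.length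

instance (kern_output : List String) (from_vibhaag : List String) (to_vibhaag : List String) : Decidable (Pre_generate_transition kern_output from_vibhaag to_vibhaag) := by
  unfold Pre_generate_transition; infer_instance

def pvWitness_generate_transition : List String × List String × List String :=
  (["\n=\n", "x"], ["X"], ["X"])

def Spec_generate_transition (kern_output : List String) (from_vibhaag : List String) (to_vibhaag : List String) (out : String × List String) : Prop := out = generate_transition_alt kern_output from_vibhaag to_vibhaag
instance (kern_output : List String) (from_vibhaag : List String) (to_vibhaag : List String) (out : String × List String) : Decidable (Spec_generate_transition kern_output from_vibhaag to_vibhaag out) := by unfold Spec_generate_transition; infer_instance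

-- ===== CLAIM (what is proved, stated in full; the proofs are below) =====
def Claim_equal_generate_transition : Prop := ∀ (kern_output : List String) (from_vibhaag : List String) (to_vibhaag : List String), Dom_generate_transition kern_output from_vibhaag to_vibhaag → Pre_generate_transition kern_output from_vibhaag to_vibhaag → Spec_generate_transition kern_output from_vibhaag to_vibhaag (generate_transition kern_output from_vibhaag to_vibhaag)

-- ===== LEMMAS AND PROOFS =====

-- proof-level reference combinators: suffix after / prefix through the m-th boundary, and the
-- reversed division count, shared normal forms both ports are reduced to
def pSkip (m : Int) : List String → List String
  | [] => []
  | s :: rest =>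
    if m ≤ 0 then s :: rest
    else pSkip (if bIsBoundary s then m - 1 else m) rest

def pTake (m : Int) : List String → List String
  | [] => []
  | s :: rest =>
    if m ≤ 0 then []
    else if bIsBoundary s then "\n=\n" :: pTake (m - 1) rest
    else s :: pTake m rest

def pCd (n : Int) : List String → Int → Int
  | [], cd => cd
  | item :: rest, cd =>
    if PySem.Str.startswith item "\n==" then cd
    else if item == "\n=\n" then pCd n rest (PySem.Int.mod (cd + 1) n)
    else pCd n rest cd

def pIdx (v : List String) : Int :=
  match PySem.List.index? v "X" with
  | some k => (k : Int)
  | none => -1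

-- the shared normal form both ports are reduced to
def pNorm (kern fv tv : List String) : String × List String :=
  let n : Int := fv.length
  let cd := pCd n kern.reverse 0
  let nti := PySem.Int.mod (pIdx tv + PySem.Int.mod (cd - pIdx fv) n) n
  let crd := PySem.Int.mod (n - nti) n
  let rest := pSkip (cd + 1) kern
  let rest2 := if PySem.Str.strip (rest.headD "") == "4ryy" then pSkip n rest else rest
  let tk := pTake crd rest2
  (PySem.Str.strip (PySem.Str.replace (PySem.Str.join "" tk) "\n\n" "\n"), tk)

-- a block produced by _split_blocks: barline-free body, one barline at the end
def GoodBlk (b : List String) : Prop :=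
  ∃ pre x, b = pre ++ [x] ∧ (∀ s ∈ pre, bIsBoundary s = false) ∧ bIsBoundary x = true

-- ---- A-side reductions (flat list → pSkip/pTake/pCd normal forms) ----

lemma cdLoop_eq (kern : List String) (n : Int) :
    ∀ (idxs : List Nat) (cd : Int),
      aCdLoop kern n idxs cd = pCd n (idxs.map (fun i => kern.getD i "")) cd := by
  intro idxs
  induction idxs with
  | nil => intro cd; rfl
  | cons i rest ih =>
    intro cd
    simp only [aCdLoop, pCd, List.map_cons]
    split_ifs <;> simp [ih]

lemma map_getD_range (kern : List String) :
    (List.range kern.length).map (fun i => kern.getD i "") = kern := by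
  apply List.ext_getElem
  · simp
  · intro i h1 h2
    simp [List.getD_eq_getElem?_getD, List.getElem?_eq_getElem h2]

lemma samLoop_aux : ∀ (tail pre : List String),
    aSamLoop (pre ++ tail) (List.range' pre.length tail.length) =
      (match PySem.List.index? tail "X" with
       | some k => ((pre.length + k : Nat) : Int)
       | none => -1) := by
  intro tail
  induction tail with
  | nil => intro pre; simp [aSamLoop, PySem.List.index?_eq_idxOf?]
  | cons s rest ih =>
    intro pre
    simp only [List.length_cons]
    rw [List.range'_succ]
    by_cases hs : s = "X"
    · subst hs
      rw [PySem.List.index?_cons_self]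
      have hget : (pre ++ "X" :: rest).getD pre.length "" = "X" := by
        simp [List.getD_eq_getElem?_getD]
      simp only [aSamLoop, hget]
      simp
    · have hget : (pre ++ s :: rest).getD pre.length "" = s := by
        simp [List.getD_eq_getElem?_getD]
      rw [PySem.List.index?_cons_of_ne _ hs]
      have h2 := ih (pre ++ [s])
      simp only [List.append_assoc, List.singleton_append, List.length_append,
        List.length_singleton] at h2
      simp only [aSamLoop, hget]
      rw [if_neg (by simp [hs]), h2]
      cases PySem.List.index? rest "X" with
      | none => rfl
      | some k => simp; ring

lemma samLoop_eq (v : List String) :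
    aSamLoop v (List.range v.length) = pIdx v := by
  have h := samLoop_aux v []
  simp only [List.nil_append, List.length_nil] at h
  rw [List.range_eq_range', h]
  unfold pIdx
  cases PySem.List.index? v "X" <;> simp

lemma cdLoop_bounds (n : Int) (hn : 0 < n) :
    ∀ (l : List String) (cd : Int), 0 ≤ cd → cd < n →
      0 ≤ pCd n l cd ∧ pCd n l cd < n := by
  intro l
  induction l with
  | nil => intro cd h0 h1; exact ⟨h0, h1⟩
  | cons s rest ih =>
    intro cd h0 h1
    simp only [pCd]
    split_ifs
    · exact ⟨h0, h1⟩
    · exact ih _ (PySem.Int.mod_nonneg _ hn) (PySem.Int.mod_lt _ hn)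
    · exact ih _ h0 h1

lemma incLoop_aux (fsi n cd : Int) (hn : 0 < n) (h0 : 0 ≤ cd) (h1 : cd < n) :
    ∀ (fuel : Nat) (i : Int), 0 ≤ i → i ≤ PySem.Int.mod (cd - fsi) n →
      PySem.Int.mod (cd - fsi) n - i ≤ (fuel : Int) →
      aIncLoop fsi n cd fuel i = PySem.Int.mod (cd - fsi) n := by
  have hmod : ∀ a : Int, PySem.Int.mod a n = a % n := fun a =>
    PySem.Int.mod_eq_emod_of_pos hn
  set t := PySem.Int.mod (cd - fsi) n with ht
  have htmod : (fsi + t) % n = cd := by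
    rw [ht, hmod, Int.add_emod_emod]
    have : fsi + (cd - fsi) = cd := by ring
    rw [this, Int.emod_eq_of_lt h0 h1]
  intro fuel
  induction fuel with
  | zero =>
    intro i hi0 hi1 hi2
    have : i = t := by omega
    subst this
    rfl
  | succ f ihf =>
    intro i hi0 hi1 hi2
    rcases eq_or_lt_of_le hi1 with heq | hlt
    · subst heq
      simp [aIncLoop, hmod, htmod]
    · have hne : PySem.Int.mod (fsi + i) n ≠ cd := by
        rw [hmod]
        intro hc
        have hdvd : n ∣ (t - i) := by
          have h1' : ((fsi + t) - (fsi + i)) % n = 0 := by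
            rw [Int.sub_emod, htmod, hc, sub_self, Int.zero_emod]
          have := Int.dvd_of_emod_eq_zero h1'
          have he : fsi + t - (fsi + i) = t - i := by ring
          rwa [he] at this
        have htlt : t < n := by rw [ht]; exact PySem.Int.mod_lt _ hn
        have hle := Int.le_of_dvd (by omega : (0:Int) < t - i) hdvd
        omega
      rw [aIncLoop, if_pos hne]
      exact ihf (i + 1) (by omega) (by omega) (by omega)

lemma incLoop_eq (fsi n cd : Int) (hn : 0 < n) (h0 : 0 ≤ cd) (h1 : cd < n) :
    aIncLoop fsi n cd n.toNat 0 = PySem.Int.mod (cd - fsi) n := by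
  have hb0 := PySem.Int.mod_nonneg (cd - fsi) hn
  have hb1 := PySem.Int.mod_lt (cd - fsi) hn
  exact incLoop_aux fsi n cd hn h0 h1 n.toNat 0 le_rfl hb0 (by omega)

lemma pSkip_nonpos (m : Int) (hm : m ≤ 0) (l : List String) : pSkip m l = l := by
  cases l <;> simp [pSkip, hm]

lemma advLoop_drop (kern : List String) :
    ∀ (i : Nat) (count target : Int),
      kern.drop (aAdvLoop kern target i count) = pSkip (target - count) (kern.drop i) := by
  intro i count target
  fun_induction aAdvLoop kern target i count with
  | case1 i count h ih =>
    obtain ⟨hc, hi⟩ := h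
    rw [dite_eq_ite] at ih
    have hget : kern.getD i "" = kern[i] := List.getD_eq_getElem kern "" hi
    rw [ih, hget, List.drop_eq_getElem_cons hi, pSkip,
        if_neg (by omega : ¬ (target - count ≤ 0))]
    simp only [bIsBoundary]
    by_cases hb : (PySem.Str.startswith kern[i] "\n==" || kern[i] == "\n=\n") = true
    · rw [if_pos hb, if_pos hb]
      congr 1
      omega
    · rw [if_neg hb, if_neg hb]
  | case2 i count h =>
    rcases not_and_or.mp h with hc | hi
    · rw [pSkip_nonpos (target - count) (by omega)]
    · rw [List.drop_eq_nil_of_le (by omega), pSkip]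

lemma collectLoop_take (kern : List String) :
    ∀ (i : Nat) (count target : Int) (acc : List String),
      aCollectLoop kern target i count acc = acc ++ pTake (target - count) (kern.drop i) := by
  intro i count target acc
  fun_induction aCollectLoop kern target i count acc with
  | case1 i count acc h hb ih =>
    obtain ⟨hc, hi⟩ := h
    have hget : kern.getD i "" = kern[i] := List.getD_eq_getElem kern "" hi
    rw [hget] at hb
    rw [ih, List.drop_eq_getElem_cons hi, pTake,
        if_neg (by omega : ¬ (target - count ≤ 0)),
        if_pos (show bIsBoundary kern[i] = true from hb)]
    have he : target - (count + 1) = target - count - 1 := by ring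
    rw [he, List.append_assoc, List.singleton_append]
  | case2 i count acc h hb ih =>
    obtain ⟨hc, hi⟩ := h
    have hget : kern.getD i "" = kern[i] := List.getD_eq_getElem kern "" hi
    rw [hget] at hb ih ⊢
    rw [ih, List.drop_eq_getElem_cons hi, pTake,
        if_neg (by omega : ¬ (target - count ≤ 0)),
        if_neg (show ¬ bIsBoundary kern[i] = true from hb)]
    rw [List.append_assoc, List.singleton_append]
  | case3 i count acc h =>
    rcases not_and_or.mp h with hc | hi
    · cases hd : kern.drop i <;> simp [pTake, (by omega : target - count ≤ 0)]
    · rw [List.drop_eq_nil_of_le (by omega)]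
      simp [pTake]

lemma getD_eq_headD_drop (kern : List String) (i : Nat) :
    kern.getD i "" = (kern.drop i).headD "" := by
  simp [List.headD_eq_head?_getD, List.head?_drop, List.getD_eq_getElem?_getD]

-- ---- B-side reductions (blocks → the same normal forms) ----

lemma bSplitAux_spec : ∀ (l cur0 : List String) (blocks0 : List (List String)),
    (∀ s ∈ cur0, bIsBoundary s = false) →
    ∃ B T, bSplitAux blocks0 cur0 l = (blocks0 ++ B, T) ∧
      B.flatten ++ T = cur0 ++ l ∧ (∀ b ∈ B, GoodBlk b) ∧ (∀ s ∈ T, bIsBoundary s = false) := by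
  intro l
  induction l with
  | nil =>
    intro cur0 blocks0 hc
    exact ⟨[], cur0, by simp [bSplitAux], by simp, by simp, hc⟩
  | cons s rest ih =>
    intro cur0 blocks0 hc
    by_cases hb : bIsBoundary s = true
    · obtain ⟨B, T, h1, h2, h3, h4⟩ := ih [] (blocks0 ++ [cur0 ++ [s]]) (by simp)
      refine ⟨(cur0 ++ [s]) :: B, T, ?_, ?_, ?_, h4⟩
      · simp only [bSplitAux, if_pos hb, h1, List.append_assoc, List.singleton_append]
      · simp only [List.flatten_cons, List.append_assoc, h2]
        simp
      · intro b hbmem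
        rcases List.mem_cons.mp hbmem with h | h
        · subst h; exact ⟨cur0, s, rfl, hc, hb⟩
        · exact h3 b h
    · obtain ⟨B, T, h1, h2, h3, h4⟩ := ih (cur0 ++ [s]) blocks0
        (by intro t ht; rcases List.mem_append.mp ht with h | h
            · exact hc t h
            · simp at h; subst h; simpa using hb)
      refine ⟨B, T, ?_, ?_, h3, h4⟩
      · simp only [bSplitAux, if_neg hb, h1]
      · rw [h2]; simp
  
lemma bSamAux_eq : ∀ (v : List String) (j : Int),
    bSamAux v j = (match PySem.List.index? v "X" with
                   | some k => j + (k : Int)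
                   | none => -1) := by
  intro v
  induction v with
  | nil => intro j; simp [bSamAux, PySem.List.index?_eq_idxOf?]
  | cons s rest ih =>
    intro j
    by_cases hs : s = "X"
    · subst hs
      rw [PySem.List.index?_cons_self]
      simp [bSamAux]
    · rw [bSamAux, if_neg (by simp [hs]), ih, PySem.List.index?_cons_of_ne _ hs]
      cases PySem.List.index? rest "X" with
      | none => rfl
      | some k => simp; ring

lemma bSamAux_zero (v : List String) : bSamAux v 0 = pIdx v := by
  rw [bSamAux_eq]
  unfold pIdx
  cases PySem.List.index? v "X" <;> simp

-- pCd over a barline-free prefix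
lemma pCd_free (n : Int) : ∀ (l rest : List String) (cd : Int),
    (∀ s ∈ l, bIsBoundary s = false) → pCd n (l ++ rest) cd = pCd n rest cd := by
  intro l
  induction l with
  | nil => intro rest cd _; rfl
  | cons s l ih =>
    intro rest cd hf
    have hs := hf s (by simp)
    simp only [bIsBoundary, Bool.or_eq_false_iff] at hs
    simp only [List.cons_append, pCd, hs.1, hs.2]
    exact ih _ _ (fun t ht => hf t (by simp [ht]))

lemma heavy_concat (pre : List String) (x : String) :
    bHeavy (pre ++ [x]) = PySem.Str.startswith x "\n==" := by
  simp [bHeavy]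

lemma pCd_block (n : Int) (b rest : List String) (cd : Int) (hg : GoodBlk b) :
    pCd n (b.reverse ++ rest) cd =
      if bHeavy b then cd else pCd n rest (PySem.Int.mod (cd + 1) n) := by
  obtain ⟨pre, x, hb, hpre, hx⟩ := hg
  subst hb
  rw [heavy_concat]
  simp only [List.reverse_append, List.reverse_singleton, List.singleton_append, List.cons_append]
  by_cases hh : PySem.Str.startswith x "\n==" = true
  · simp only [pCd, if_pos hh]
  · have hlight : (x == "\n=\n") = true := by
      simp only [bIsBoundary, Bool.or_eq_true] at hx
      rcases hx with h | h
      · exact absurd h hh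
      · exact h
    simp only [pCd]
    rw [if_neg hh, if_neg hh, if_pos hlight,
        pCd_free n _ _ _ (by intro t ht; exact hpre t (List.mem_reverse.mp ht))]

-- fold of pCd over reversed blocks
def cdFold (n : Int) : List (List String) → Int → Int
  | [], cd => cd
  | b :: r, cd => if bHeavy b then cd else cdFold n r (PySem.Int.mod (cd + 1) n)

lemma pCd_flatten (n : Int) : ∀ (rbs : List (List String)) (cd : Int),
    (∀ b ∈ rbs, GoodBlk b) →
    pCd n ((rbs.map List.reverse).flatten) cd = cdFold n rbs cd := by
  intro rbs
  induction rbs with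
  | nil => intro cd _; rfl
  | cons b r ih =>
    intro cd hg
    simp only [List.map_cons, List.flatten_cons, cdFold]
    rw [pCd_block n b _ cd (hg b (by simp))]
    split_ifs with hh
    · rfl
    · exact ih _ (fun b hb => hg b (by simp [hb]))

lemma cdFold_eq (n : Int) (hn : 0 < n) : ∀ (rbs : List (List String)) (cd : Int),
    0 ≤ cd → cd < n →
    cdFold n rbs cd =
      PySem.Int.mod (cd + ((rbs.takeWhile (fun b => !bHeavy b)).length : Int)) n := by
  intro rbs
  induction rbs with
  | nil =>
    intro cd h0 h1
    simp [cdFold, List.takeWhile, PySem.Int.mod_eq_emod_of_pos hn, Int.emod_eq_of_lt h0 h1]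
  | cons b r ih =>
    intro cd h0 h1
    simp only [cdFold, List.takeWhile_cons]
    by_cases hh : bHeavy b = true
    · simp [hh, PySem.Int.mod_eq_emod_of_pos hn, Int.emod_eq_of_lt h0 h1]
    · rw [if_neg hh, ih _ (PySem.Int.mod_nonneg _ hn) (PySem.Int.mod_lt _ hn)]
      simp only [Bool.not_eq_true] at hh
      simp only [hh, Bool.not_false, if_pos, List.length_cons]
      simp only [PySem.Int.mod_eq_emod_of_pos hn]
      push_cast
      rw [Int.emod_add_emod]
      ring_nf

-- forward reset counter = length of the barline-free block suffix
lemma foldl_since (bs : List (List String)) :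
    bs.foldl (fun k b => if bHeavy b then 0 else k + 1) (0 : Int) =
      ((bs.reverse.takeWhile (fun b => !bHeavy b)).length : Int) := by
  induction bs using List.reverseRecOn with
  | nil => simp
  | append_singleton bs b ih =>
    rw [List.foldl_append]
    simp only [List.foldl_cons, List.foldl_nil, List.reverse_append, List.reverse_singleton,
      List.singleton_append, List.takeWhile_cons]
    by_cases hh : bHeavy b = true
    · simp [hh]
    · simp only [Bool.not_eq_true] at hh
      simp [hh, ih]

-- pSkip on a block stream
lemma pSkip_free (m : Int) : ∀ (l : List String),
    (∀ s ∈ l, bIsBoundary s = false) → 1 ≤ m → pSkip m l = [] := by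
  intro l
  induction l with
  | nil => intro _ _; rfl
  | cons s rest ih =>
    intro hf hm
    rw [pSkip, if_neg (by omega), hf s (by simp)]
    exact ih (fun t ht => hf t (by simp [ht])) hm

lemma pSkip_block (m : Int) (b rest : List String) (hg : GoodBlk b) (hm : 1 ≤ m) :
    pSkip m (b ++ rest) = pSkip (m - 1) rest := by
  obtain ⟨pre, x, hb, hpre, hx⟩ := hg
  subst hb
  induction pre with
  | nil =>
    simp only [List.nil_append, List.singleton_append]
    rw [pSkip, if_neg (by omega), hx]
    simp
  | cons s pre ih =>
    have hs := hpre s (by simp)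
    simp only [List.cons_append, List.append_assoc, List.singleton_append] at ih ⊢
    rw [pSkip, if_neg (by omega), hs]
    exact ih (fun t ht => hpre t (by simp [ht]))

lemma pSkip_flatten : ∀ (bs : List (List String)) (tl : List String) (m : Int),
    0 ≤ m → (∀ b ∈ bs, GoodBlk b) → (∀ s ∈ tl, bIsBoundary s = false) →
    pSkip m (bs.flatten ++ tl) =
      if m ≤ (bs.length : Int) then (bs.drop m.toNat).flatten ++ tl else [] := by
  intro bs
  induction bs with
  | nil =>
    intro tl m h0 _ hf
    simp only [List.flatten_nil, List.nil_append, List.length_nil, Nat.cast_zero]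
    by_cases hm : m ≤ 0
    · have : m = 0 := by omega
      subst this
      simp [pSkip_nonpos 0 le_rfl]
    · rw [if_neg (by omega), pSkip_free m tl hf (by omega)]
  | cons b bs ih =>
    intro tl m h0 hg hf
    by_cases hm : m ≤ 0
    · have : m = 0 := by omega
      subst this
      rw [pSkip_nonpos 0 le_rfl, if_pos (by push_cast; omega)]
      simp
    · rw [List.flatten_cons, List.append_assoc, pSkip_block m b _ (hg b (by simp)) (by omega),
          ih tl (m - 1) (by omega) (fun b hb => hg b (by simp [hb])) hf]
      have hlen : ((b :: bs).length : Int) = (bs.length : Int) + 1 := by simp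
      by_cases hc : m - 1 ≤ (bs.length : Int)
      · rw [if_pos hc, if_pos (by omega)]
        have : m.toNat = (m - 1).toNat + 1 := by omega
        rw [this]
        simp
      · rw [if_neg hc, if_neg (by omega)]

-- pTake on a block stream
lemma pTake_free (m : Int) : ∀ (l : List String),
    (∀ s ∈ l, bIsBoundary s = false) → 1 ≤ m → pTake m l = l := by
  intro l
  induction l with
  | nil => intro _ _; rfl
  | cons s rest ih =>
    intro hf hm
    rw [pTake, if_neg (by omega), if_neg (by simp [hf s (by simp)]),
        ih (fun t ht => hf t (by simp [ht])) hm]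

lemma pTake_nonpos (m : Int) (hm : m ≤ 0) (l : List String) : pTake m l = [] := by
  cases l <;> simp [pTake, hm]

lemma pTake_block (m : Int) (b rest : List String) (hg : GoodBlk b) (hm : 1 ≤ m) :
    pTake m (b ++ rest) = b.dropLast ++ "\n=\n" :: pTake (m - 1) rest := by
  obtain ⟨pre, x, hb, hpre, hx⟩ := hg
  subst hb
  rw [List.dropLast_concat]
  induction pre with
  | nil =>
    simp only [List.nil_append, List.singleton_append]
    rw [pTake, if_neg (by omega), if_pos hx]
  | cons s pre ih =>
    have hs := hpre s (by simp)
    simp only [List.cons_append, List.append_assoc, List.singleton_append] at ih ⊢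
    rw [pTake, if_neg (by omega), if_neg (by simp [hs]),
        ih (fun t ht => hpre t (by simp [ht]))]

lemma pTake_flatten : ∀ (bs : List (List String)) (tl : List String) (m : Int),
    0 ≤ m → (∀ b ∈ bs, GoodBlk b) → (∀ s ∈ tl, bIsBoundary s = false) →
    pTake m (bs.flatten ++ tl) =
      ((bs.take m.toNat).map (fun b => b.dropLast ++ ["\n=\n"])).flatten ++
        (if (bs.length : Int) < m then tl else []) := by
  intro bs
  induction bs with
  | nil =>
    intro tl m h0 _ hf
    simp only [List.flatten_nil, List.nil_append, List.take_nil, List.map_nil, List.length_nil,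
      Nat.cast_zero]
    by_cases hm : m ≤ 0
    · have : m = 0 := by omega
      subst this
      rw [pTake_nonpos 0 le_rfl, if_neg (by omega)]
    · rw [pTake_free m tl hf (by omega), if_pos (by omega)]
  | cons b bs ih =>
    intro tl m h0 hg hf
    by_cases hm : m ≤ 0
    · have : m = 0 := by omega
      subst this
      rw [pTake_nonpos 0 le_rfl, if_neg (by push_cast; omega)]
      simp
    · rw [List.flatten_cons, List.append_assoc, pTake_block m b _ (hg b (by simp)) (by omega)]
      rw [ih tl (m - 1) (by omega) (fun b hb => hg b (by simp [hb])) hf]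
      have : m.toNat = (m - 1).toNat + 1 := by omega
      rw [this]
      simp only [List.take_succ_cons, List.map_cons, List.flatten_cons, List.length_cons]
      by_cases hc : (bs.length : Int) < m - 1
      · rw [if_pos hc, if_pos (by push_cast; omega)]
        simp
      · rw [if_neg hc, if_neg (by push_cast; omega)]
        simp

-- ===== VERDICT (by name: the statement is the Claim_ definition above) =====
-- Port A reduces to the normal form
lemma a_eq_pNorm (kern fv tv : List String) (hfv : fv ≠ []) :
    generate_transition kern fv tv = pNorm kern fv tv := by
  have hn : 0 < ((fv.length : Nat) : Int) := by
    have : fv.length ≠ 0 := fun h => hfv (List.eq_nil_of_length_eq_zero h)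
    omega
  simp only [generate_transition, pNorm]
  have hcd : aCdLoop kern (fv.length : Int) (List.range kern.length).reverse 0
      = pCd (fv.length : Int) kern.reverse 0 := by
    have hmap : (List.range kern.length).reverse.map (fun i => kern.getD i "") = kern.reverse := by
      rw [List.map_reverse, map_getD_range]
    rw [cdLoop_eq, hmap]
  obtain ⟨hb0, hb1⟩ := cdLoop_bounds ((fv.length : Nat) : Int) hn kern.reverse 0 le_rfl hn
  rw [hcd, samLoop_eq fv, samLoop_eq tv,
      incLoop_eq (pIdx fv) ((fv.length : Nat) : Int) _ hn hb0 hb1]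
  set n : Int := ((fv.length : Nat) : Int) with hn_def
  set cd : Int := pCd n kern.reverse 0 with hcd_def
  have h1 : kern.drop (aAdvLoop kern cd 0 (-1)) = pSkip (cd + 1) kern := by
    have h := advLoop_drop kern 0 (-1) cd
    simpa [sub_neg_eq_add] using h
  have h4 : kern.getD (aAdvLoop kern cd 0 (-1)) "" = (pSkip (cd + 1) kern).headD "" := by
    rw [getD_eq_headD_drop, h1]
  rw [h4]
  have h2 : kern.drop
      (if (PySem.Str.strip ((pSkip (cd + 1) kern).headD "") == "4ryy") = true
       then aAdvLoop kern n (aAdvLoop kern cd 0 (-1)) 0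
       else aAdvLoop kern cd 0 (-1))
      = (if (PySem.Str.strip ((pSkip (cd + 1) kern).headD "") == "4ryy") = true
         then pSkip n (pSkip (cd + 1) kern)
         else pSkip (cd + 1) kern) := by
    split_ifs
    · rw [advLoop_drop kern _ 0 n, sub_zero, h1]
    · exact h1
  rw [collectLoop_take kern, sub_zero, List.nil_append, h2]

-- Port B reduces to the normal form
lemma b_eq_pNorm (kern fv tv : List String) (hfv : fv ≠ []) :
    generate_transition_alt kern fv tv = pNorm kern fv tv := by
  have hn : 0 < ((fv.length : Nat) : Int) := by
    have : fv.length ≠ 0 := fun h => hfv (List.eq_nil_of_length_eq_zero h)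
    omega
  obtain ⟨B, T, hsp, hflat, hgood, hfree⟩ := bSplitAux_spec kern [] []
    (by intro s hs; simp at hs)
  rw [List.nil_append] at hsp hflat
  simp only [generate_transition_alt, pNorm, hsp]
  set n : Int := ((fv.length : Nat) : Int) with hn_def
  set since : Int := B.foldl (fun k b => if bHeavy b then 0 else k + 1) (0 : Int) with hsince_def
  -- the reversed division count equals the forward reset counter, mod n
  have hcd : pCd n kern.reverse 0 = PySem.Int.mod since n := by
    rw [← hflat, List.reverse_append, List.reverse_flatten, ← List.map_reverse,
        pCd_free n T.reverse _ 0 (by intro s hs; exact hfree s (List.mem_reverse.mp hs)),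
        pCd_flatten n B.reverse 0 (by intro b hb; exact hgood b (List.mem_reverse.mp hb)),
        cdFold_eq n hn B.reverse 0 le_rfl hn, hsince_def, foldl_since, zero_add]
  rw [hcd, bSamAux_zero fv, bSamAux_zero tv]
  set cd : Int := PySem.Int.mod since n with hcd_def
  have hcd0 : 0 ≤ cd := PySem.Int.mod_nonneg _ hn
  set crd : Int := PySem.Int.mod (n - PySem.Int.mod (pIdx tv + PySem.Int.mod (cd - pIdx fv) n) n) n with hcrd_def
  have hcrd0 : 0 ≤ crd := PySem.Int.mod_nonneg _ hn
  set q : List (List String) × List String :=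
    (if cd + 1 ≤ (B.length : Int) then (B.drop (cd + 1).toNat, T) else ([], [])) with hq_def
  have hq1good : ∀ b ∈ q.1, GoodBlk b := by
    rw [hq_def]; split_ifs
    · intro b hb; exact hgood b (List.mem_of_mem_drop hb)
    · intro b hb; simp at hb
  have hq2free : ∀ s ∈ q.2, bIsBoundary s = false := by
    rw [hq_def]; split_ifs
    · exact hfree
    · intro s hs; simp at hs
  have hrest : pSkip (cd + 1) kern = q.1.flatten ++ q.2 := by
    rw [← hflat, pSkip_flatten B T (cd + 1) (by omega) hgood hfree, hq_def]
    split_ifs with h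
    · rfl
    · simp
  have hlead : (pSkip (cd + 1) kern).headD ""
      = (match q.1 with | b :: _ => b.headD "" | [] => q.2.headD "") := by
    cases hq1 : q.1 with
    | nil => rw [hrest, hq1]; simp
    | cons b bs =>
      obtain ⟨pre, x, hbx, -, -⟩ := hq1good b (by rw [hq1]; simp)
      rw [hrest, hq1, hbx]
      cases pre <;> simp
  rw [hlead]
  set lead : String := (match q.1 with | b :: _ => b.headD "" | [] => q.2.headD "") with hlead_def
  set r : List (List String) × List String :=
    (if PySem.Str.strip lead == "4ryy" then
       (if n ≤ (q.1.length : Int) then (q.1.drop n.toNat, q.2) else ([], []))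
     else q) with hr_def
  have hr1good : ∀ b ∈ r.1, GoodBlk b := by
    rw [hr_def]; split_ifs
    · intro b hb; exact hq1good b (List.mem_of_mem_drop hb)
    · intro b hb; simp at hb
    · exact hq1good
  have hr2free : ∀ s ∈ r.2, bIsBoundary s = false := by
    rw [hr_def]; split_ifs
    · exact hq2free
    · intro s hs; simp at hs
    · exact hq2free
  have hrest2 : (if (PySem.Str.strip lead == "4ryy") = true
      then pSkip n (pSkip (cd + 1) kern) else pSkip (cd + 1) kern)
      = r.1.flatten ++ r.2 := by
    rw [hrest, hr_def]
    split_ifs with h1 h2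
    · rw [pSkip_flatten q.1 q.2 n (by omega) hq1good hq2free, if_pos h2]
    · rw [pSkip_flatten q.1 q.2 n (by omega) hq1good hq2free, if_neg h2]
      simp
    · rfl
  rw [hrest2, pTake_flatten r.1 r.2 crd hcrd0 hr1good hr2free]

-- ===== the verdict =====
theorem generate_transition_spec : Claim_equal_generate_transition := by
  intro kern fv tv _ hpre
  unfold Spec_generate_transition
  rw [a_eq_pNorm kern fv tv hpre.1, b_eq_pNorm kern fv tv hpre.1]
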